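-- pv_equiv track=rewrite | github.com/blacksmithalex/ege_computer_science | Отдельные задачи/25/1/main.py | isFit
-- ===== SOURCE A (Python) =====
-- from math import sqrt
--
-- def isPrime(n):
--     for d in range(2, int(sqrt(n) + 1)):
--         if n % d == 0:
--             return False
--     return True
--
-- def dividers(n):
--     div = set()
--     for d in range(2, int(sqrt(n)) + 1):
--         if n % d == 0:
--             div.add(d)
--             div.add(n // d)
--     return div
--
-- def isFit(n):
--     div = dividers(n)
--     if len(div) != 2:
--         return False
--     for d in div:
--         if not isPrime(d):
--             return False
--     return True
-- ===== SOURCE B (Python) =====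
-- from math import sqrt
--
-- def isPrime(n):
--     for d in range(2, int(sqrt(n) + 1)):
--         if n % d == 0:
--             return False
--     return True
--
-- def isFit(n):
--     for d in range(2, int(sqrt(n)) + 1):
--         if n % d == 0:
--             q = n // d
--             return isPrime(d) and isPrime(q) and d != q
--     return False
-- ===== Notes on version B (the rewrite author's own statement) =====
-- stated objective: simpler
-- what changed: B stops at the first trial divisor d and checks isPrime(d) and isPrime(n//d) and d != n//d, instead of A's building the full divisor set up to sqrt(n), counting it, and testing every element for primality.
import Mathlib
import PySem

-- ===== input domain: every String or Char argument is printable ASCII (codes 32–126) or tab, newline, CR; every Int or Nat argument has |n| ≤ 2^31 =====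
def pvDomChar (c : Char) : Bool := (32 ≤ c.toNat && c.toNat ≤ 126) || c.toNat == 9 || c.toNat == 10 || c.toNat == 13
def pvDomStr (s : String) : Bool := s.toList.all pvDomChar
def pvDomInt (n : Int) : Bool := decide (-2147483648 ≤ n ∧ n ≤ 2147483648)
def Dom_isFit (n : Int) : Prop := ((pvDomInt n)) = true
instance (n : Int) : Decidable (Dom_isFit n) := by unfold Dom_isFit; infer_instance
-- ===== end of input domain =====

-- B replaces A's build-the-whole-divisor-set-then-count strategy by stopping at the FIRST
-- divisor d and checking isPrime(d) && isPrime(n//d) && d != n//d (objective: simpler —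
-- no divisor set is built or counted).

-- ===== PORT A =====
-- int(math.sqrt(n)) for 0 ≤ n ≤ 2^31+1: math.sqrt is correctly rounded and n is far below
-- 2^52, so int(sqrt(n)) = ⌊√n⌋ = Nat.sqrt n.toNat exactly on the admitted domain; likewise
-- int(sqrt(n) + 1) = ⌊√n⌋ + 1 there (the float sum never rounds across an integer).
def pySqrt (n : Int) : Int := (Nat.sqrt n.toNat : Int)

-- helper isPrime, shared: B reuses A's isPrime unchanged
def pyIsPrime (n : Int) : Bool :=
  (PySem.List.pyRange 2 (pySqrt n + 1) 1).all (fun d => !(PySem.Int.mod n d == 0))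

-- helper dividers
def pyDividers (n : Int) : PySem.Set Int :=
  (PySem.List.pyRange 2 (pySqrt n + 1) 1).foldl
    (fun div d =>
      if PySem.Int.mod n d == 0 then
        PySem.Set.add (PySem.Set.add div d) (PySem.Int.floordiv n d)
      else div)
    PySem.Set.empty

def isFit (n : Int) : Bool :=
  let div := pyDividers n
  if PySem.Set.len div != 2 then false
  else div.all (fun d => pyIsPrime d)   -- order-independent consumption of the set

-- ===== PORT B =====
def isFit_alt (n : Int) : Bool :=
  match (PySem.List.pyRange 2 (pySqrt n + 1) 1).find? (fun d => PySem.Int.mod n d == 0) with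
  | some d => pyIsPrime d && pyIsPrime (PySem.Int.floordiv n d) && (d != PySem.Int.floordiv n d)
  | none => false

-- ===== PRECONDITION & SPEC =====
-- Pre_ excludes negative n, on which math.sqrt raises ValueError in A (and in B).
def Pre_isFit (n : Int) : Prop := 0 ≤ n
instance (n : Int) : Decidable (Pre_isFit n) := by unfold Pre_isFit; infer_instance
def pvWitness_isFit : Int := (6)

def Spec_isFit (n : Int) (out : Bool) : Prop := out = isFit_alt n
instance (n : Int) (out : Bool) : Decidable (Spec_isFit n out) := by unfold Spec_isFit; infer_instance

-- ===== CLAIM (what is proved, stated in full; the proofs are below) =====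
def Claim_equal_isFit : Prop := ∀ (n : Int), Dom_isFit n → Pre_isFit n → Spec_isFit n (isFit n)

-- ===== LEMMAS AND PROOFS =====

-- the loop body of dividers, named for the lemmas below
def divStep (n : Int) : List Int → Int → List Int := fun div d =>
  if PySem.Int.mod n d == 0 then
    PySem.Set.add (PySem.Set.add div d) (PySem.Int.floordiv n d)
  else div

theorem pyDividers_eq_foldl (n : Int) :
    pyDividers n = (PySem.List.pyRange 2 (pySqrt n + 1) 1).foldl (divStep n) [] := rfl

theorem mem_divFold (n : Int) (l : List Int) (s0 : List Int) (x : Int) :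
    x ∈ l.foldl (divStep n) s0 ↔
      x ∈ s0 ∨ ∃ d ∈ l, (PySem.Int.mod n d == 0) = true ∧
        (x = d ∨ x = PySem.Int.floordiv n d) := by
  induction l generalizing s0 with
  | nil => simp
  | cons a l ih =>
    simp only [List.foldl_cons, ih, divStep]
    split <;> rename_i h <;> simp_all [PySem.Set.mem_add]
    · constructor
      · rintro (((h1|h1)|h1)|h1)
        · exact Or.inl h1
        · exact Or.inr (Or.inl (Or.inl h1))
        · exact Or.inr (Or.inl (Or.inr h1))
        · exact Or.inr (Or.inr h1)
      · rintro (h1|(h1|h1)|h1)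
        · exact Or.inl (Or.inl (Or.inl h1))
        · exact Or.inl (Or.inl (Or.inr h1))
        · exact Or.inl (Or.inr h1)
        · exact Or.inr h1

theorem nodup_divFold (n : Int) (l : List Int) (s0 : List Int) (h : s0.Nodup) :
    (l.foldl (divStep n) s0).Nodup := by
  induction l generalizing s0 with
  | nil => exact h
  | cons a l ih =>
    simp only [List.foldl_cons, divStep]
    split
    · exact ih _ (PySem.Set.nodup_add _ _ (PySem.Set.nodup_add _ _ h))
    · exact ih _ h

theorem divFold_of_none (n : Int) (l : List Int) (s0 : List Int)
    (h : ∀ d ∈ l, (PySem.Int.mod n d == 0) = false) :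
    l.foldl (divStep n) s0 = s0 := by
  induction l generalizing s0 with
  | nil => rfl
  | cons a l ih =>
    simp only [List.foldl_cons, divStep, h a (by simp)]
    simp only [Bool.false_eq_true, if_false]
    exact ih _ (fun d hd => h d (by simp [hd]))

-- pyIsPrime characterised: for 2 ≤ x it decides Nat.Prime x.toNat
theorem pyIsPrime_iff (x : Int) (hx : 2 ≤ x) :
    pyIsPrime x = true ↔ Nat.Prime x.toNat := by
  rw [Nat.prime_def_le_sqrt]
  unfold pyIsPrime
  rw [List.all_eq_true]
  constructor
  · intro h
    refine ⟨by omega, fun m hm2 hms hdvd => ?_⟩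
    have hmem : (m : Int) ∈ PySem.List.pyRange 2 (pySqrt x + 1) 1 := by
      rw [PySem.List.mem_pyRange_one]
      unfold pySqrt
      constructor
      · exact_mod_cast hm2
      · have : (m : Int) ≤ (Nat.sqrt x.toNat : Nat) := by exact_mod_cast hms
        omega
    have := h _ hmem
    rw [Bool.not_eq_eq_eq_not, Bool.not_true, beq_eq_false_iff_ne] at this
    apply this
    rw [PySem.Int.mod_eq_zero_iff_dvd]
    have : x = ((x.toNat : Nat) : Int) := by omega
    rw [this]
    exact_mod_cast hdvd
  · rintro ⟨-, h⟩ d hd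
    rw [PySem.List.mem_pyRange_one] at hd
    unfold pySqrt at hd
    rw [Bool.not_eq_eq_eq_not, Bool.not_true, beq_eq_false_iff_ne]
    intro hmod
    rw [PySem.Int.mod_eq_zero_iff_dvd] at hmod
    have hd2 : 2 ≤ d.toNat := by omega
    have hds : d.toNat ≤ Nat.sqrt x.toNat := by omega
    apply h d.toNat hd2 hds
    have hx' : x = ((x.toNat : Nat) : Int) := by omega
    have hdn : d = ((d.toNat : Nat) : Int) := by omega
    rw [hx', hdn] at hmod
    exact_mod_cast hmod

-- divisors of a product of two distinct primes
theorem dvd_prime_mul (p q d : Nat) (hp : p.Prime) (hq : q.Prime) (h : d ∣ p * q) :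
    d = 1 ∨ d = p ∨ d = q ∨ d = p * q := by
  by_cases hpd : p ∣ d
  · obtain ⟨e, he⟩ := hpd
    have he' : e ∣ q := by
      have h' := h
      rw [he] at h'
      exact (Nat.mul_dvd_mul_iff_left hp.pos).mp h'
    rcases (Nat.Prime.eq_one_or_self_of_dvd hq e he') with h1 | h1
    · subst h1; right; left; omega
    · subst h1; right; right; right; exact he
  · have hc : Nat.Coprime d p := Nat.Coprime.symm ((Nat.Prime.coprime_iff_not_dvd hp).mpr hpd)
    have hdq : d ∣ q := Nat.Coprime.dvd_of_dvd_mul_left hc h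
    rcases (Nat.Prime.eq_one_or_self_of_dvd hq d hdq) with h1 | h1
    · left; exact h1
    · right; right; left; exact h1

-- a Nodup list of length 2 containing a has a second, different element
theorem exists_other_of_len_two {l : List Int} (h2 : l.length = 2) (hnd : l.Nodup)
    {a : Int} (ha : a ∈ l) : ∃ x ∈ l, x ≠ a := by
  match l, h2 with
  | [u, v], _ =>
    simp only [List.nodup_cons, List.mem_cons, List.not_mem_nil, or_false,
      List.nodup_nil, and_true] at hnd ha
    rcases ha with rfl | rfl
    · exact ⟨v, by simp, fun hv => hnd.1 (hv ▸ rfl)⟩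
    · exact ⟨u, by simp, fun hu => hnd.1 hu⟩

theorem isFit_eq_true_iff (n : Int) :
    isFit n = true ↔ (pyDividers n).length = 2 ∧ ∀ x ∈ pyDividers n, pyIsPrime x = true := by
  unfold isFit
  simp only [PySem.Set.len]
  split <;> rename_i h
  · simp only [Bool.false_eq_true, false_iff, not_and]
    intro h2
    simp [h2] at h
  · simp only [bne_iff_ne, ne_eq, not_not] at h
    have h2 : (pyDividers n).length = 2 := by exact_mod_cast h
    simp [h2, List.all_eq_true]

-- ===== VERDICT (by name: the statement is the Claim_ definition above) =====
theorem isFit_spec : Claim_equal_isFit := by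
  intro n _ hpre
  unfold Pre_isFit at hpre
  unfold Spec_isFit isFit_alt
  cases hf : (PySem.List.pyRange 2 (pySqrt n + 1) 1).find? (fun d => PySem.Int.mod n d == 0) with
  | none =>
    have hall : ∀ d ∈ PySem.List.pyRange 2 (pySqrt n + 1) 1, (PySem.Int.mod n d == 0) = false := by
      intro d hd
      simpa using List.find?_eq_none.mp hf d hd
    have hset : pyDividers n = [] := by
      rw [pyDividers_eq_foldl]; exact divFold_of_none _ _ _ hall
    simp only [isFit, hset]
    rfl
  | some d0 =>
    have hd0memR : d0 ∈ PySem.List.pyRange 2 (pySqrt n + 1) 1 := List.mem_of_find?_eq_some hf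
    have hd0cond : (PySem.Int.mod n d0 == 0) = true := List.find?_some (p := fun d => PySem.Int.mod n d == 0) hf
    have hd0mem := hd0memR
    rw [PySem.List.mem_pyRange_one] at hd0mem
    obtain ⟨hd02, hd0s⟩ := hd0mem
    have hd0s' := hd0s
    unfold pySqrt at hd0s
    have hnm : n = (n.toNat : Int) := by omega
    have hsq : Nat.sqrt n.toNat * Nat.sqrt n.toNat ≤ n.toNat := Nat.sqrt_le n.toNat
    have hd0p : d0 = (d0.toNat : Int) := by omega
    have hp2 : 2 ≤ d0.toNat := by omega
    have hps : d0.toNat ≤ Nat.sqrt n.toNat := by omega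
    have hpm : d0.toNat * d0.toNat ≤ n.toNat := Nat.le_sqrt.mp hps
    have hm4 : 4 ≤ n.toNat := by nlinarith
    have hs2 : 2 ≤ Nat.sqrt n.toNat := le_trans hp2 hps
    have hdvd : d0 ∣ n := by
      rw [← PySem.Int.mod_eq_zero_iff_dvd]; exact beq_iff_eq.mp hd0cond
    have hpdvd : d0.toNat ∣ n.toNat := by
      have h' : (d0.toNat : Int) ∣ (n.toNat : Int) := by rw [← hd0p, ← hnm]; exact hdvd
      exact_mod_cast h'
    have hq0 : PySem.Int.floordiv n d0 = ((n.toNat / d0.toNat : Nat) : Int) := by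
      rw [hnm, hd0p]; exact_mod_cast PySem.Int.floordiv_natCast n.toNat d0.toNat
    have hpq : d0.toNat * (n.toNat / d0.toNat) = n.toNat := Nat.mul_div_cancel' hpdvd
    have hqp : d0.toNat ≤ n.toNat / d0.toNat := by
      by_contra hc; push Not at hc; nlinarith
    have hq2 : 2 ≤ n.toNat / d0.toNat := le_trans hp2 hqp
    have hsleq : Nat.sqrt n.toNat ≤ n.toNat / d0.toNat := by
      by_contra hc; push Not at hc; nlinarith
    change isFit n = (pyIsPrime d0 && pyIsPrime (PySem.Int.floordiv n d0) && (d0 != PySem.Int.floordiv n d0))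
    rw [hq0, Bool.eq_iff_iff, isFit_eq_true_iff]
    simp only [Bool.and_eq_true, bne_iff_ne, ne_eq]
    have hd0D : d0 ∈ pyDividers n := by
      rw [pyDividers_eq_foldl, mem_divFold]
      exact Or.inr ⟨d0, hd0memR, hd0cond, Or.inl rfl⟩
    have hqD : ((n.toNat / d0.toNat : Nat) : Int) ∈ pyDividers n := by
      rw [pyDividers_eq_foldl, mem_divFold]
      exact Or.inr ⟨d0, hd0memR, hd0cond, Or.inr hq0.symm⟩
    constructor
    · -- A true → B true
      rintro ⟨hlen, hallp⟩
      have hDnodup : (pyDividers n).Nodup := by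
        rw [pyDividers_eq_foldl]; exact nodup_divFold _ _ _ (by simp)
      refine ⟨⟨hallp _ hd0D, hallp _ hqD⟩, ?_⟩
      intro heq
      have hqp' : n.toNat / d0.toNat = d0.toNat := by omega
      have hmpp : n.toNat = d0.toNat * d0.toNat := by rw [← hpq, hqp']
      have hpPrime : d0.toNat.Prime := (pyIsPrime_iff d0 hd02).mp (hallp _ hd0D)
      obtain ⟨x, hxD, hxne⟩ := exists_other_of_len_two hlen hDnodup hd0D
      have hxprime0 := hallp x hxD
      rw [pyDividers_eq_foldl, mem_divFold] at hxD
      rcases hxD with h | ⟨d, hdR, hdcond, hxval⟩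
      · simp at h
      rw [PySem.List.mem_pyRange_one] at hdR
      unfold pySqrt at hdR
      have hdn : d = (d.toNat : Int) := by omega
      have hddvd : d.toNat ∣ n.toNat := by
        have h1 : d ∣ n := by
          rw [← PySem.Int.mod_eq_zero_iff_dvd]; exact beq_iff_eq.mp hdcond
        have h2 : (d.toNat : Int) ∣ (n.toNat : Int) := by rw [← hdn, ← hnm]; exact h1
        exact_mod_cast h2
      have hdt2 : 2 ≤ d.toNat := by omega
      have hdts : d.toNat ≤ Nat.sqrt n.toNat := by omega
      have hx2 : 2 ≤ x ∧ x.toNat ∣ n.toNat := by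
        rcases hxval with rfl | rfl
        · exact ⟨by omega, hddvd⟩
        · have hxq : PySem.Int.floordiv n d = ((n.toNat / d.toNat : Nat) : Int) := by
            rw [hnm, hdn]; exact_mod_cast PySem.Int.floordiv_natCast n.toNat d.toNat
          rw [hxq]
          have hge : Nat.sqrt n.toNat ≤ n.toNat / d.toNat := by
            rw [Nat.le_div_iff_mul_le (by omega)]
            nlinarith
          constructor
          · exact_mod_cast (by omega : (2:Nat) ≤ n.toNat / d.toNat)
          · simp only [Int.toNat_natCast]
            exact Nat.div_dvd_of_dvd hddvd
      have hxPrime : x.toNat.Prime := (pyIsPrime_iff x hx2.1).mp hxprime0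
      have hxp : x.toNat = d0.toNat := by
        rcases (Nat.Prime.dvd_mul hxPrime).mp (hmpp ▸ hx2.2) with h | h <;>
          exact (Nat.prime_dvd_prime_iff_eq hxPrime hpPrime).mp h
      exact hxne (by omega)
    · -- B true → A true
      rintro ⟨⟨hPd0, hPq⟩, hne⟩
      have hpPrime : d0.toNat.Prime := (pyIsPrime_iff d0 hd02).mp hPd0
      have hqPrime : (n.toNat / d0.toNat).Prime := by
        have h := (pyIsPrime_iff _ (by exact_mod_cast hq2)).mp hPq
        rwa [Int.toNat_natCast] at h
      have hpqne : d0.toNat ≠ n.toNat / d0.toNat := by omega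
      have hplt : d0.toNat < n.toNat / d0.toNat := lt_of_le_of_ne hqp hpqne
      have hsltq : Nat.sqrt n.toNat < n.toNat / d0.toNat := by
        by_contra hc; push Not at hc; nlinarith
      have hsm : Nat.sqrt n.toNat < n.toNat := by nlinarith
      have huniq : ∀ e ∈ PySem.List.pyRange 2 (pySqrt n + 1) 1, e ≠ d0 →
          (PySem.Int.mod n e == 0) = false := by
        intro e heR hene
        rw [PySem.List.mem_pyRange_one] at heR
        unfold pySqrt at heR
        by_contra hc
        rw [Bool.not_eq_false, beq_iff_eq, PySem.Int.mod_eq_zero_iff_dvd] at hc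
        have hen : e = (e.toNat : Int) := by omega
        have het : e.toNat ∣ n.toNat := by
          have h2 : (e.toNat : Int) ∣ (n.toNat : Int) := by rw [← hen, ← hnm]; exact hc
          exact_mod_cast h2
        have he2 : 2 ≤ e.toNat := by omega
        have hes : e.toNat ≤ Nat.sqrt n.toNat := by omega
        have het' : e.toNat ∣ d0.toNat * (n.toNat / d0.toNat) := by rw [hpq]; exact het
        rcases dvd_prime_mul d0.toNat (n.toNat / d0.toNat) e.toNat hpPrime hqPrime
          het' with h | h | h | h
        · omega
        · exact hene (by omega)
        · omega
        · rw [hpq] at h; omega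
      have hsub1 : ∀ e ∈ PySem.List.pyRange 2 d0 1, (PySem.Int.mod n e == 0) = false := by
        intro e he
        rw [PySem.List.mem_pyRange_one] at he
        refine huniq e ?_ (by omega)
        rw [PySem.List.mem_pyRange_one]
        unfold pySqrt
        omega
      have hsub2 : ∀ e ∈ PySem.List.pyRange (d0 + 1) (pySqrt n + 1) 1,
          (PySem.Int.mod n e == 0) = false := by
        intro e he
        rw [PySem.List.mem_pyRange_one] at he
        refine huniq e ?_ (by omega)
        rw [PySem.List.mem_pyRange_one]
        unfold pySqrt at he ⊢
        omega
      have hqnotmem : ((n.toNat / d0.toNat : Nat) : Int) ∉ ([d0] : List Int) := by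
        intro h
        exact hne (List.mem_singleton.mp h).symm
      have hstep : divStep n [] d0 = [d0, ((n.toNat / d0.toNat : Nat) : Int)] := by
        unfold divStep
        rw [if_pos hd0cond, hq0,
          show PySem.Set.add ([] : List Int) d0 = [d0] from rfl,
          PySem.Set.add_of_not_mem hqnotmem]
        rfl
      have hset : pyDividers n = [d0, ((n.toNat / d0.toNat : Nat) : Int)] := by
        rw [pyDividers_eq_foldl,
          PySem.List.pyRange_one_append 2 d0 (pySqrt n + 1) hd02 (le_of_lt hd0s'),
          PySem.List.pyRange_one_cons hd0s',
          List.foldl_append, List.foldl_cons,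
          divFold_of_none n _ [] hsub1, hstep,
          divFold_of_none n _ _ hsub2]
      refine ⟨by rw [hset]; rfl, ?_⟩
      intro x hx
      rw [hset] at hx
      rcases List.mem_cons.mp hx with rfl | hx2
      · exact hPd0
      rcases List.mem_cons.mp hx2 with rfl | hx3
      · exact hPq
      · simp at hx3
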